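-- pv_equiv track=rewrite | github.com/Chris91ss/UBB-FMI-Computer_Science | Third year/First Semester/Programare paralela si distribuita/Lab7/polynomial_multiplication.py | subtract_polynomials
-- ===== SOURCE A (Python) =====
-- from typing import List, Tuple
--
-- def subtract_polynomials(poly1: List[int], poly2: List[int]) -> List[int]:
--     """Subtract two polynomials"""
--     max_len = max(len(poly1), len(poly2))
--     result = [0] * max_len
--
--     for i in range(len(poly1)):
--         result[i] += poly1[i]
--
--     for i in range(len(poly2)):
--         result[i] -= poly2[i]
--
--     return result
-- ===== SOURCE B (Python) =====
-- def subtract_polynomials(poly1, poly2):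
--     """Subtract two polynomials"""
--     k = min(len(poly1), len(poly2))
--     head = [poly1[i] - poly2[i] for i in range(k)]
--     return head + poly1[k:] + [-c for c in poly2[k:]]
-- ===== Notes on version B (the rewrite author's own statement) =====
-- stated objective: alternative
-- what changed: Instead of preallocating a max-length zero array and running two accumulation loops over it, B subtracts only over the common prefix of length min(len,len) and splices the leftover tail of the longer polynomial (negated for poly2) onto it unchanged, so no coefficient beyond the shorter polynomial is ever paired with a zero.
import Mathlib
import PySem

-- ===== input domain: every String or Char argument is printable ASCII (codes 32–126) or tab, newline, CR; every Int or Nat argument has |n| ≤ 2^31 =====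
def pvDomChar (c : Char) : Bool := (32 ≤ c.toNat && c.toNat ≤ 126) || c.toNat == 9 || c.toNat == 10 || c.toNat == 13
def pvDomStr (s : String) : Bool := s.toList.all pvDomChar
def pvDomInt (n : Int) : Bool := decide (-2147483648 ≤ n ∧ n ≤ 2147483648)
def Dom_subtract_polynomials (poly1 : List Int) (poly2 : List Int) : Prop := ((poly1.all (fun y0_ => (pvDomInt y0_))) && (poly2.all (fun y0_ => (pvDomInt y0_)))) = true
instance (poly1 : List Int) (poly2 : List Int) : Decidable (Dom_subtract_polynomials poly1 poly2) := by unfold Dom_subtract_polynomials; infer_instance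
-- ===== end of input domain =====

-- B subtracts over the common prefix only and splices the leftover tail of the longer
-- polynomial (negated for poly2) onto it, instead of A's preallocated max-length zero
-- array updated by two accumulation loops (alternative decomposition, same cost).

-- ===== PORT A =====
def subtract_polynomials (poly1 : List Int) (poly2 : List Int) : List Int :=
  let max_len := max poly1.length poly2.length
  let result := List.replicate max_len (0 : Int)
  let result := (List.range poly1.length).foldl
    (fun r i => r.set i (r.getD i 0 + poly1.getD i 0)) result
  let result := (List.range poly2.length).foldl
    (fun r i => r.set i (r.getD i 0 - poly2.getD i 0)) result
  result

-- ===== PORT B =====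
def subtract_polynomials_alt (poly1 : List Int) (poly2 : List Int) : List Int :=
  let k := min poly1.length poly2.length
  let head := (List.range k).map (fun i => poly1.getD i 0 - poly2.getD i 0)
  head ++ poly1.drop k ++ (poly2.drop k).map (fun c => -c)

-- ===== PRECONDITION & SPEC =====
def Spec_subtract_polynomials (poly1 : List Int) (poly2 : List Int) (out : List Int) : Prop := out = subtract_polynomials_alt poly1 poly2
instance (poly1 : List Int) (poly2 : List Int) (out : List Int) : Decidable (Spec_subtract_polynomials poly1 poly2 out) := by unfold Spec_subtract_polynomials; infer_instance

-- ===== CLAIM (what is proved, stated in full; the proofs are below) =====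
def Claim_equal_subtract_polynomials : Prop := ∀ (poly1 : List Int) (poly2 : List Int), Dom_subtract_polynomials poly1 poly2 → Spec_subtract_polynomials poly1 poly2 (subtract_polynomials poly1 poly2)

-- ===== LEMMAS AND PROOFS =====

-- generic pass lemma: folding `set i (r[i] + f i)` over range n (n ≤ length) adds f pointwise below n
theorem pass_getD (l : List Int) (f : Nat → Int) (n : Nat) (hn : n ≤ l.length) :
    ((List.range n).foldl (fun r i => r.set i (r.getD i 0 + f i)) l).length = l.length ∧
    ∀ j, ((List.range n).foldl (fun r i => r.set i (r.getD i 0 + f i)) l).getD j 0 =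
      if j < n then l.getD j 0 + f j else l.getD j 0 := by
  induction n with
  | zero => simp
  | succ n ih =>
    obtain ⟨hlen, hget⟩ := ih (Nat.le_of_succ_le hn)
    rw [List.range_succ, List.foldl_append, List.foldl_cons, List.foldl_nil]
    refine ⟨by rw [List.length_set]; exact hlen, fun j => ?_⟩
    rw [List.getD_eq_getElem?_getD, List.getElem?_set]
    by_cases hj : n = j
    · subst hj
      rw [if_pos rfl, hlen, if_pos (by omega), Option.getD_some, hget n,
        if_neg (Nat.lt_irrefl n), if_pos (by omega)]
    · rw [if_neg hj, ← List.getD_eq_getElem?_getD, hget j]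
      by_cases h1 : j < n
      · rw [if_pos h1, if_pos (by omega)]
      · rw [if_neg h1, if_neg (by omega)]

theorem getD_of_ge (l : List Int) (j : Nat) (h : l.length ≤ j) : l.getD j 0 = 0 := by
  rw [List.getD_eq_getElem?_getD, List.getElem?_eq_none h, Option.getD_none]

theorem alt_length (p q : List Int) :
    (subtract_polynomials_alt p q).length = max p.length q.length := by
  unfold subtract_polynomials_alt
  simp; omega

theorem alt_getD (p q : List Int) (j : Nat) :
    (subtract_polynomials_alt p q).getD j 0 =
      (if j < max p.length q.length then p.getD j 0 - q.getD j 0 else 0) := by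
  unfold subtract_polynomials_alt
  simp only [List.getD_eq_getElem?_getD]
  by_cases h1 : j < min p.length q.length
  · rw [List.getElem?_append_left (by simp; omega), List.getElem?_append_left (by simp; omega),
      List.getElem?_map, List.getElem?_range h1]
    simp; omega
  · by_cases h2 : j < max p.length q.length
    · rw [if_pos h2]
      by_cases hp : j < p.length
      · -- in poly1's tail: q exhausted, so q.getD j 0 = 0
        have hq : q.length ≤ j := by omega
        rw [List.getElem?_append_left (by simp; omega),
          List.getElem?_append_right (by simp; omega)]
        simp only [List.length_map, List.length_range, List.getElem?_drop]
        have : min p.length q.length + (j - min p.length q.length) = j := by omega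
        rw [this, List.getElem?_eq_getElem hp, Option.getD_some,
          List.getElem?_eq_none hq]
        simp
      · -- in poly2's negated tail: p exhausted
        have hq : j < q.length := by omega
        have hp' : p.length ≤ j := by omega
        have hmin : min p.length q.length = p.length := by omega
        rw [List.getElem?_append_right (by simp; omega)]
        simp only [List.length_append, List.length_map, List.length_range, List.length_drop,
          List.getElem?_map, List.getElem?_drop, hmin]
        have hidx : p.length + (j - (p.length + (p.length - p.length))) = j := by omega
        rw [hidx, List.getElem?_eq_getElem hq, List.getElem?_eq_none hp']
        simp
    · rw [if_neg h2, List.getElem?_eq_none (by simp; omega), Option.getD_none]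

-- ===== VERDICT (by name: the statement is the Claim_ definition above) =====
theorem subtract_polynomials_spec : Claim_equal_subtract_polynomials := by
  intro p q _
  show subtract_polynomials p q = subtract_polynomials_alt p q
  unfold subtract_polynomials
  rw [show (fun (r : List Int) (i : Nat) => r.set i (r.getD i 0 - q.getD i 0)) =
      (fun (r : List Int) (i : Nat) => r.set i (r.getD i 0 + (fun k => -(q.getD k 0)) i)) from by
    funext r i; rw [sub_eq_add_neg]]
  have h1 := pass_getD (List.replicate (max p.length q.length) (0 : Int))
    (fun k => p.getD k 0) p.length (by simp)
  have h2 := pass_getD ((List.range p.length).foldl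
      (fun r i => r.set i (r.getD i 0 + (fun k => p.getD k 0) i))
      (List.replicate (max p.length q.length) (0 : Int)))
    (fun k => -(q.getD k 0)) q.length (by rw [h1.1, List.length_replicate]; omega)
  apply List.ext_getElem
  · rw [h2.1, h1.1, List.length_replicate, alt_length]
  · intro j hj hj'
    have hjM : j < max p.length q.length := by
      rw [h2.1, h1.1, List.length_replicate] at hj; exact hj
    have lhs : (((List.range q.length).foldl
        (fun r i => r.set i (r.getD i 0 + (fun k => -(q.getD k 0)) i))
        ((List.range p.length).foldl
          (fun r i => r.set i (r.getD i 0 + (fun k => p.getD k 0) i))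
          (List.replicate (max p.length q.length) (0 : Int))))).getD j 0
        = p.getD j 0 - q.getD j 0 := by
      rw [h2.2 j, h1.2 j]
      have hrep : (List.replicate (max p.length q.length) (0 : Int)).getD j 0 = 0 := by
        rw [List.getD_eq_getElem?_getD, List.getElem?_replicate, if_pos hjM, Option.getD_some]
      rw [hrep]
      split_ifs with c1 c2 c2
      · ring
      · rw [getD_of_ge p j (by omega)]; ring
      · rw [getD_of_ge q j (by omega)]; ring
      · rw [getD_of_ge p j (by omega), getD_of_ge q j (by omega)]; ring
    have rhs := alt_getD p q j
    rw [if_pos hjM] at rhs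
    have l1 : ∀ (L : List Int) (h : j < L.length), L[j] = L.getD j 0 := by
      intro L h
      rw [List.getD_eq_getElem?_getD, List.getElem?_eq_getElem h, Option.getD_some]
    rw [l1 _ hj, l1 _ hj', lhs, rhs]
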